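-- pv_equiv track=rewrite | github.com/arek-grows/Challenges | Challenge227.py | search_win
-- ===== SOURCE A (Python) =====
-- def search_win(plays: list[str], color: str) -> bool:
--     count = 0
--     for play in plays:
--         if play == color:
--             count += 1
--             if count == 4:
--                 return True
--         else:
--             count = 0
--     return False
-- ===== SOURCE B (Python) =====
-- def search_win(plays: list[str], color: str) -> bool:
--     # runs-based scan: find each maximal run of equal plays, test its length
--     n = len(plays)
--     i = 0
--     while i < n:
--         j = i + 1
--         while j < n and plays[j] == plays[i]:
--             j += 1
--         if plays[i] == color and j - i >= 4:
--             return True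
--         i = j
--     return False
-- ===== Notes on version B (the rewrite author's own statement) =====
-- stated objective: alternative
-- what changed: B splits the list into maximal runs of consecutive equal plays and tests whether a run of the color has length >= 4, instead of maintaining a per-element reset counter with an early return at count == 4.
import Mathlib
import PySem

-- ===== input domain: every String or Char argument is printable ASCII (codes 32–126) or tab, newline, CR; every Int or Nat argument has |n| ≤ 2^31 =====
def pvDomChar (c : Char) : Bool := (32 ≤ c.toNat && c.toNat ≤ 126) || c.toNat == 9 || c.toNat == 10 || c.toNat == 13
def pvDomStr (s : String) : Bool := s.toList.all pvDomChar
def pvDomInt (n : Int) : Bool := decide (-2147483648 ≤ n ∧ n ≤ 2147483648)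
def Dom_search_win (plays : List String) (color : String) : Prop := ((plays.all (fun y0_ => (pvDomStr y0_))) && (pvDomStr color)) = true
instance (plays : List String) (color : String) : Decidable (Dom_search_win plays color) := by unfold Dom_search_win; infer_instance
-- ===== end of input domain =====

-- B replaces A's reset-counter scan by a runs decomposition (index scan over maximal runs of equal plays, test run length); alternative algorithm, same cost.


-- ===== PORT A =====
-- A's loop: counter incremented on a match, reset on a mismatch, early return at 4.
def searchWinAux (color : String) : List String → Nat → Bool
  | [], _ => false
  | p :: ps, c =>
    if p == color then
      (if c + 1 == 4 then true else searchWinAux color ps (c + 1))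
    else searchWinAux color ps 0

def search_win (plays : List String) (color : String) : Bool :=
  searchWinAux color plays 0

-- ===== PORT B =====
-- B's inner while loop: advance j past the run of plays equal to plays[i]
-- (indexing is always in range in Source B, so getD's default is never read).
def searchInner (plays : List String) (n : Nat) (x : String) (j : Nat) : Nat :=
  if j < n ∧ plays.getD j "" == x then searchInner plays n x (j + 1) else j
termination_by n - j
decreasing_by omega

-- termination fact for the outer loop: j only moves forward
theorem searchInner_ge (plays : List String) (n : Nat) (x : String) :
    ∀ j, j ≤ searchInner plays n x j := by
  intro j
  induction hk : n - j using Nat.strong_induction_on generalizing j with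
  | _ k ih =>
    rw [searchInner]
    split
    · rename_i h
      have := ih (n - (j + 1)) (by omega) (j + 1) rfl
      omega
    · exact Nat.le_refl j

-- B's outer while loop over run starts
def searchOuter (plays : List String) (n : Nat) (color : String) (i : Nat) : Bool :=
  if i < n then
    let j := searchInner plays n (plays.getD i "") (i + 1)
    if plays.getD i "" == color && 4 ≤ j - i then true
    else searchOuter plays n color j
  else false
termination_by n - i
decreasing_by
  have := searchInner_ge plays n (plays.getD i "") (i + 1)
  omega

def search_win_alt (plays : List String) (color : String) : Bool :=
  searchOuter plays plays.length color 0

-- ===== PRECONDITION & SPEC =====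
def Spec_search_win (plays : List String) (color : String) (out : Bool) : Prop := out = search_win_alt plays color
instance (plays : List String) (color : String) (out : Bool) : Decidable (Spec_search_win plays color out) := by unfold Spec_search_win; infer_instance

-- ===== CLAIM (what is proved, stated in full; the proofs are below) =====
def Claim_equal_search_win : Prop := ∀ (plays : List String) (color : String), Dom_search_win plays color → Spec_search_win plays color (search_win plays color)

-- ===== LEMMAS AND PROOFS =====

-- proof-side bridge: the runs decomposition as a structural recursion on the list
def runsRec (plays : List String) (color : String) : Bool :=
  match plays with
  | [] => false
  | x :: xs =>
    if x == color && 4 ≤ (xs.takeWhile (· == x)).length + 1 then true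
    else runsRec (xs.dropWhile (· == x)) color
termination_by plays.length
decreasing_by
  simp only [List.length_cons]
  exact Nat.lt_succ_of_le (List.length_dropWhile_le _ _)

-- a run of mismatching plays just resets the counter repeatedly
theorem aux_skip (color : String) (run rest : List String)
    (h : ∀ y ∈ run, (y == color) = false) :
    searchWinAux color (run ++ rest) 0 = searchWinAux color rest 0 := by
  induction run with
  | nil => rfl
  | cons a l ih =>
    simp only [List.cons_append, searchWinAux, h a (by simp)]
    exact ih (fun y hy => h y (by simp [hy]))

-- a run of k matching plays: returns true once the counter reaches 4, else carries c + k on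
theorem aux_replicate (color : String) (k : Nat) :
    ∀ (c : Nat) (rest : List String), c < 4 →
    searchWinAux color (List.replicate k color ++ rest) c =
      (if 4 ≤ c + k then true else searchWinAux color rest (c + k)) := by
  induction k with
  | zero =>
    intro c rest hc
    rw [List.replicate_zero, List.nil_append, Nat.add_zero, if_neg (by omega)]
  | succ k ih =>
    intro c rest hc
    simp only [List.replicate_succ, List.cons_append, searchWinAux, BEq.rfl, if_true]
    by_cases h4 : c + 1 = 4
    · have : 4 ≤ c + (k + 1) := by omega
      simp [h4, this]
    · have hc' : c + 1 < 4 := by omega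
      rw [if_neg (by simpa using h4), ih (c + 1) rest hc']
      have : c + 1 + k = c + (k + 1) := by omega
      rw [this]

-- if the head of rest does not match, the carried counter is irrelevant
theorem aux_head_reset (color : String) (rest : List String) (c : Nat)
    (h : ∀ y ∈ rest.head?, (y == color) = false) :
    searchWinAux color rest c = searchWinAux color rest 0 := by
  cases rest with
  | nil => rfl
  | cons a l =>
    have := h a (by simp)
    simp [searchWinAux, this]

theorem head?_dropWhile {α : Type} (p : α → Bool) (l : List α) :
    ∀ y ∈ (l.dropWhile p).head?, p y = false := by
  induction l with
  | nil => simp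
  | cons a l ih =>
    intro y hy
    by_cases h : p a
    · rw [List.dropWhile_cons_of_pos h] at hy; exact ih y hy
    · rw [List.dropWhile_cons_of_neg h] at hy
      simp at hy; subst hy; simpa using h

-- A equals the runs recursion
theorem a_eq_runs (color : String) : ∀ (plays : List String),
    search_win plays color = runsRec plays color := by
  intro plays
  induction hn : plays.length using Nat.strong_induction_on generalizing plays with
  | _ n ih =>
    cases plays with
    | nil => simp [search_win, searchWinAux, runsRec]
    | cons x xs =>
      subst hn
      have hsplit : xs.takeWhile (· == x) ++ xs.dropWhile (· == x) = xs :=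
        List.takeWhile_append_dropWhile
      have hlt : (xs.dropWhile (· == x)).length < (x :: xs).length :=
        Nat.lt_succ_of_le (List.length_dropWhile_le _ _)
      have ihd := ih _ hlt (xs.dropWhile (· == x)) rfl
      simp only [search_win] at ihd
      by_cases hx : x == color
      · -- matching head: the run is a replicate of color
        have hxc : x = color := by simpa using hx
        subst hxc
        have hrun : xs.takeWhile (· == x) =
            List.replicate (xs.takeWhile (· == x)).length x := by
          apply List.eq_replicate_of_mem
          intro b hb
          have := List.mem_takeWhile_imp hb
          simpa using this
        have hA : search_win (x :: xs) x =
            searchWinAux x (List.replicate ((xs.takeWhile (· == x)).length + 1) x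
              ++ xs.dropWhile (· == x)) 0 := by
          simp only [search_win]
          rw [List.replicate_succ, ← hrun, List.cons_append, hsplit]
        rw [hA, aux_replicate x _ 0 _ (by omega)]
        by_cases h4 : 4 ≤ (xs.takeWhile (· == x)).length + 1
        · rw [if_pos (by omega)]
          rw [runsRec]
          simp [h4]
        · rw [if_neg (by omega)]
          rw [aux_head_reset x (xs.dropWhile (· == x)) _ (head?_dropWhile _ _)]
          rw [runsRec]
          simp only [BEq.rfl, Bool.true_and]
          rw [if_neg (by simpa using h4)]
          exact ihd
      · -- mismatching head: the whole run (head included) resets the counter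
        have hA : search_win (x :: xs) color =
            searchWinAux color (xs.dropWhile (· == x)) 0 := by
          simp only [search_win, searchWinAux, hx, Bool.false_eq_true, if_false]
          conv_lhs => rw [← hsplit]
          apply aux_skip
          intro y hy
          have := List.mem_takeWhile_imp hy
          have hyx : y = x := by simpa using this
          subst hyx; simpa using hx
        rw [hA, ihd]
        rw [runsRec]
        simp [hx]

-- dropping the takeWhile prefix is dropWhile
theorem drop_length_takeWhile {α : Type} (p : α → Bool) (l : List α) :
    l.drop (l.takeWhile p).length = l.dropWhile p := by
  induction l with
  | nil => rfl
  | cons a l ih =>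
    by_cases h : p a
    · rw [List.takeWhile_cons_of_pos h, List.dropWhile_cons_of_pos h, List.length_cons,
        List.drop_succ_cons, ih]
    · rw [List.takeWhile_cons_of_neg h, List.dropWhile_cons_of_neg h, List.length_nil,
        List.drop_zero]

-- the inner loop computes the run length at j, as a takeWhile on the dropped list
theorem searchInner_eq (plays : List String) (x : String) :
    ∀ j, searchInner plays plays.length x j =
      j + ((plays.drop j).takeWhile (· == x)).length := by
  intro j
  induction hk : plays.length - j using Nat.strong_induction_on generalizing j with
  | _ k ih =>
    rw [searchInner]
    by_cases hj : j < plays.length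
    · have hcons : plays.drop j = plays[j] :: plays.drop (j + 1) :=
        List.drop_eq_getElem_cons hj
      have hgd : plays.getD j "" = plays[j] := List.getD_eq_getElem _ _ hj
      by_cases hx : plays[j] == x
      · rw [if_pos ⟨hj, by rw [hgd]; exact hx⟩]
        rw [ih (plays.length - (j + 1)) (by omega) (j + 1) rfl]
        simp only [hcons, List.takeWhile_cons, hx, if_true, List.length_cons]
        omega
      · rw [if_neg (by rw [hgd]; exact fun h => hx h.2)]
        rw [hcons, List.takeWhile_cons, if_neg (by simpa using hx), List.length_nil,
          Nat.add_zero]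
    · rw [if_neg (fun h => hj h.1)]
      rw [List.drop_eq_nil_of_le (by omega), List.takeWhile_nil, List.length_nil, Nat.add_zero]

-- the outer loop from index i is the runs recursion on the dropped list
theorem searchOuter_eq (plays : List String) (color : String) :
    ∀ i, searchOuter plays plays.length color i = runsRec (plays.drop i) color := by
  intro i
  induction hk : plays.length - i using Nat.strong_induction_on generalizing i with
  | _ k ih =>
    rw [searchOuter]
    by_cases hi : i < plays.length
    · have hcons : plays.drop i = plays[i] :: plays.drop (i + 1) :=
        List.drop_eq_getElem_cons hi
      have hgd : plays.getD i "" = plays[i] := List.getD_eq_getElem _ _ hi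
      rw [if_pos hi, hgd]
      have hj : searchInner plays plays.length plays[i] (i + 1)
          = i + 1 + ((plays.drop (i + 1)).takeWhile (· == plays[i])).length := by
        rw [searchInner_eq]
      rw [hj]
      simp only []
      have hsub : i + 1 + ((plays.drop (i + 1)).takeWhile (· == plays[i])).length - i
          = ((plays.drop (i + 1)).takeWhile (· == plays[i])).length + 1 := by omega
      rw [hsub, hcons, runsRec]
      by_cases hcond : (plays[i] == color &&
          decide (4 ≤ ((plays.drop (i + 1)).takeWhile (· == plays[i])).length + 1)) = true
      · rw [if_pos hcond, if_pos hcond]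
      · rw [if_neg hcond, if_neg hcond]
        rw [ih (plays.length - (i + 1 + ((plays.drop (i + 1)).takeWhile (· == plays[i])).length))
          (by omega) _ rfl]
        congr 1
        rw [← drop_length_takeWhile (· == plays[i]) (plays.drop (i + 1)), List.drop_drop]
    · rw [if_neg hi, List.drop_eq_nil_of_le (by omega), runsRec]

-- ===== VERDICT (by name: the statement is the Claim_ definition above) =====
theorem search_win_spec : Claim_equal_search_win := by
  intro plays color _
  unfold Spec_search_win search_win_alt
  rw [searchOuter_eq plays color 0, List.drop_zero, a_eq_runs]
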